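-- pv_equiv track=rewrite | github.com/Sopraz/Work | Exercices Dossier 2 Sorbonne.py | triplets
-- ===== SOURCE A (Python) =====
-- def triplets(n):
--     tab = []
--     for i in range(1,n+1):
--         for g in range(1,n+1):
--             for k in range(1,n+1):
--                 tuple = i,g,k
--                 tab.append(tuple)
--     return tab
-- ===== SOURCE B (Python) =====
-- def triplets(n):
--     nn = n * n
--     out = []
--     for idx in range(nn * n):
--         i, r = divmod(idx, nn)
--         g, k = divmod(r, n)
--         out.append((i + 1, g + 1, k + 1))
--     return out
-- ===== Notes on version B (the rewrite author's own statement) =====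
-- stated objective: alternative
-- what changed: Replaces the three nested loops by a single loop over the flat indices 0..n^3-1, decoding each index into its (i,g,k) triple with two divmods.
import Mathlib
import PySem

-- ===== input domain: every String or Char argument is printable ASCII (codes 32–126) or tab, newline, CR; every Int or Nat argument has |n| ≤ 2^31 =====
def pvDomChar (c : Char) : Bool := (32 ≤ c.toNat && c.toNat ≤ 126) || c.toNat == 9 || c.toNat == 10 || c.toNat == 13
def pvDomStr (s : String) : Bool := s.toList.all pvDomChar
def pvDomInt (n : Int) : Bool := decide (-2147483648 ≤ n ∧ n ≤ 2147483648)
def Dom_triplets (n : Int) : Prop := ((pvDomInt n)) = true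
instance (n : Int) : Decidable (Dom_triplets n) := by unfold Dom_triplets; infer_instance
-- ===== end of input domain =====

-- B replaces the three nested loops by one loop over the flat indices 0..n^3-1, decoding each
-- index into its triple with divmod (different decomposition, same cost).

-- ===== PORT A =====
def triplets (n : Int) : List (Int × Int × Int) :=
  (PySem.List.pyRange 1 (n + 1) 1).foldl (fun tab i =>
    (PySem.List.pyRange 1 (n + 1) 1).foldl (fun tab g =>
      (PySem.List.pyRange 1 (n + 1) 1).foldl (fun tab k =>
        tab ++ [(i, g, k)]) tab) tab) []

-- ===== PORT B =====
-- divmod(a, b) is ported as the pair (floordiv a b, mod a b): its divisors nn and n are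
-- nonzero whenever the loop body runs (the range is empty for n = 0).
def triplets_alt (n : Int) : List (Int × Int × Int) :=
  let nn := n * n
  (PySem.List.pyRange 0 (nn * n) 1).foldl (fun out idx =>
    let i := PySem.Int.floordiv idx nn
    let r := PySem.Int.mod idx nn
    let g := PySem.Int.floordiv r n
    let k := PySem.Int.mod r n
    out ++ [(i + 1, g + 1, k + 1)]) []

-- ===== PRECONDITION & SPEC =====
def Spec_triplets (n : Int) (out : List (Int × Int × Int)) : Prop := out = triplets_alt n
instance (n : Int) (out : List (Int × Int × Int)) : Decidable (Spec_triplets n out) := by unfold Spec_triplets; infer_instance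

-- ===== CLAIM (what is proved, stated in full; the proofs are below) =====
def Claim_equal_triplets : Prop := ∀ (n : Int), Dom_triplets n → Spec_triplets n (triplets n)

-- ===== LEMMAS AND PROOFS =====

-- splitting a range of a product into blocks
theorem range_mul_flatMap (a b : Nat) :
    List.range (a * b) = (List.range a).flatMap (fun i => (List.range b).map (fun j => b * i + j)) := by
  induction a with
  | zero => simp
  | succ a ih =>
    rw [Nat.succ_mul, List.range_add, ih, List.range_succ, List.flatMap_append]
    simp [Nat.mul_comm]

-- A as nested flatMaps over the shared range
theorem triplets_eq_flatMap (n : Int) :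
    triplets n = (PySem.List.pyRange 1 (n + 1) 1).flatMap (fun i =>
      (PySem.List.pyRange 1 (n + 1) 1).flatMap (fun g =>
        (PySem.List.pyRange 1 (n + 1) 1).map (fun k => (i, g, k)))) := by
  unfold triplets
  rw [show (fun tab i =>
        (PySem.List.pyRange 1 (n + 1) 1).foldl (fun tab g =>
          (PySem.List.pyRange 1 (n + 1) 1).foldl (fun tab k =>
            tab ++ [(i, g, k)]) tab) tab)
      = (fun (tab : List (Int × Int × Int)) i => tab ++
          (PySem.List.pyRange 1 (n + 1) 1).flatMap (fun g =>
            (PySem.List.pyRange 1 (n + 1) 1).map (fun k => (i, g, k)))) from ?_]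
  · rw [PySem.List.foldl_append_eq_flatMap]; simp
  · funext tab i
    rw [show (fun (tab : List (Int × Int × Int)) g =>
          (PySem.List.pyRange 1 (n + 1) 1).foldl (fun tab k => tab ++ [(i, g, k)]) tab)
        = (fun (tab : List (Int × Int × Int)) g => tab ++
            (PySem.List.pyRange 1 (n + 1) 1).map (fun k => (i, g, k))) from ?_]
    · rw [PySem.List.foldl_append_eq_flatMap]
    · funext tab g
      rw [PySem.List.foldl_append_singleton_eq_map]

-- B as a map of the decoder over the flat range
theorem triplets_alt_eq_map (n : Int) :
    triplets_alt n = (PySem.List.pyRange 0 (n * n * n) 1).map (fun idx =>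
      (PySem.Int.floordiv idx (n * n) + 1,
       PySem.Int.floordiv (PySem.Int.mod idx (n * n)) n + 1,
       PySem.Int.mod (PySem.Int.mod idx (n * n)) n + 1)) := by
  unfold triplets_alt
  rw [PySem.List.foldl_append_singleton_eq_map]; simp

-- main equality
theorem triplets_eq_alt (n : Int) : triplets n = triplets_alt n := by
  rw [triplets_eq_flatMap, triplets_alt_eq_map]
  by_cases hn : n ≤ 0
  · rw [PySem.List.pyRange_one_eq_nil (by omega : n + 1 ≤ 1),
        PySem.List.pyRange_one_eq_nil (by nlinarith : n * n * n ≤ 0)]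
    simp
  · obtain ⟨N, hN⟩ : ∃ N : Nat, n = (N : Int) := ⟨n.toNat, (Int.toNat_of_nonneg (by omega)).symm⟩
    subst hN
    rw [PySem.List.pyRange_one, PySem.List.pyRange_one]
    have h3 : ((N : Int) * N * N - 0).toNat = N * N * N := by
      rw [Int.sub_zero, show ((N : Int) * N * N) = ((N * N * N : Nat) : Int) by push_cast; ring,
          Int.toNat_natCast]
    have h1 : ((N : Int) + 1 - 1).toNat = N := by omega
    rw [h3, h1, range_mul_flatMap (N * N) N, range_mul_flatMap N N]
    simp only [List.flatMap_assoc, List.flatMap_map, List.map_flatMap, List.map_map,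
      Function.comp_def]
    refine (List.flatMap_congr ?_).symm
    intro i hi
    rw [List.mem_range] at hi
    refine List.flatMap_congr ?_
    intro g hg
    rw [List.mem_range] at hg
    refine List.map_congr_left ?_
    intro k hk
    rw [List.mem_range] at hk
    have hN : 0 < N := by omega
    have hNN : 0 < N * N := Nat.mul_pos hN hN
    have hc : N * g + k < N * N := by nlinarith
    have e0 : (0 : Int) + ↑(N * (N * i + g) + k) = ((N * N * i + (N * g + k) : Nat) : Int) := by
      push_cast; ring
    have ediv : (N * N * i + (N * g + k)) / (N * N) = i := by
      rw [Nat.mul_add_div hNN, Nat.div_eq_of_lt hc, Nat.add_zero]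
    have emod : (N * N * i + (N * g + k)) % (N * N) = N * g + k := by
      rw [Nat.mul_add_mod, Nat.mod_eq_of_lt hc]
    have ediv2 : (N * g + k) / N = g := by
      rw [Nat.mul_add_div hN, Nat.div_eq_of_lt hk, Nat.add_zero]
    have emod2 : (N * g + k) % N = k := by
      rw [Nat.mul_add_mod, Nat.mod_eq_of_lt hk]
    rw [e0, show ((N : Int) * N) = ((N * N : Nat) : Int) by push_cast; ring]
    rw [PySem.Int.floordiv_natCast, PySem.Int.mod_natCast, ediv, emod,
        PySem.Int.floordiv_natCast, PySem.Int.mod_natCast, ediv2, emod2]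
    simp [Int.add_comm]

-- ===== VERDICT (by name: the statement is the Claim_ definition above) =====
theorem triplets_spec : Claim_equal_triplets := by
  intro n _
  unfold Spec_triplets
  exact triplets_eq_alt n
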